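-- pv_equiv track=rewrite | github.com/LishanSD/Python-Projects | Route_Optimization/Algoritnm.py | r_len
-- ===== SOURCE A (Python) =====
-- def r_len(map, solution):
--     """Calculate total route length of all trucks."""
--     total_len = 0
--     for route in solution:
--         if not route:
--             continue
--         length = map[0][route[0]]  # ✅ depot → first city
--         for j in range(1, len(route)):
--             length += map[route[j-1]][route[j]]
--         total_len += length + map[route[-1]][0]  # ✅ return to depot
--     return total_len
-- ===== SOURCE B (Python) =====
-- def r_len(map, solution):
--     """Calculate total route length of all trucks."""
--     # Pass 1: collect the flat multiset of traversed edges (depot edges included).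
--     edges = []
--     for route in solution:
--         if not route:
--             continue
--         edges.extend(zip([0] + list(route), list(route) + [0]))
--     # Pass 2: aggregate into an edge -> multiplicity counter.
--     cnt = {}
--     for e in edges:
--         cnt[e] = cnt.get(e, 0) + 1
--     # Pass 3: weighted sum, one matrix lookup per DISTINCT edge.
--     return sum(map[a][b] * c for (a, b), c in cnt.items())
-- ===== Notes on version B (the rewrite author's own statement) =====
-- stated objective: alternative
-- what changed: B replaces A's per-route accumulation with three staged passes: it flattens all routes into one multiset of traversed edges, aggregates it into an edge->multiplicity counter dict, and returns the weighted sum map[a][b]*count over the distinct edges, so each distinct edge's weight is looked up once.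
import Mathlib
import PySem

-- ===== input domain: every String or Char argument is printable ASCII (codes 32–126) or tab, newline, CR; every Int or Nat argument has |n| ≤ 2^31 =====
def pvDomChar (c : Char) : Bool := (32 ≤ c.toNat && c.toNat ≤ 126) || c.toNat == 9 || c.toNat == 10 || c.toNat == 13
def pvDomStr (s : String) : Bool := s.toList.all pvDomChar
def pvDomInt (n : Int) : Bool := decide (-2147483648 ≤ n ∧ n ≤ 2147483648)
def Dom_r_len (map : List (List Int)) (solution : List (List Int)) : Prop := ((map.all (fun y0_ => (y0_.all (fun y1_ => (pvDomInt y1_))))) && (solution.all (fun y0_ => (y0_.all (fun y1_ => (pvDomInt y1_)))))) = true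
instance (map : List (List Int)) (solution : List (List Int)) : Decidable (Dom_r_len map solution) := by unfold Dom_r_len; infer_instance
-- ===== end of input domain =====

-- B replaces A's per-route accumulation by three staged passes: flatten all routes
-- into one multiset of traversed edges, aggregate it into an edge->multiplicity
-- counter dict, then take the weighted sum of matrix weights (objective: alternative).

-- ===== PORT A =====
def r_len (map : List (List Int)) (solution : List (List Int)) : Int :=
  solution.foldl (fun total_len route =>
    if route = [] then total_len
    else
      -- length = map[0][route[0]]
      let length : Int :=
        PySem.List.pyGetD (PySem.List.pyGetD map 0 []) (PySem.List.pyGetD route 0 0) 0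
      -- for j in range(1, len(route)): length += map[route[j-1]][route[j]]
      let length :=
        (PySem.List.pyRange 1 (route.length : Int) 1).foldl
          (fun length j =>
            length + PySem.List.pyGetD
              (PySem.List.pyGetD map (PySem.List.pyGetD route (j - 1) 0) [])
              (PySem.List.pyGetD route j 0) 0)
          length
      -- total_len += length + map[route[-1]][0]
      total_len + (length +
        PySem.List.pyGetD
          (PySem.List.pyGetD map (PySem.List.pyGetD route (-1) 0) []) 0 0))
    0

-- ===== PORT B =====
def r_len_alt (map : List (List Int)) (solution : List (List Int)) : Int :=
  -- edges = []; for route in solution: if route: edges.extend(zip([0]+route, route+[0]))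
  let edges : List (Int × Int) :=
    solution.foldl (fun edges route =>
      if route = [] then edges
      else edges ++ List.zip (0 :: route) (route ++ [0])) []
  -- cnt = {}; for e in edges: cnt[e] = cnt.get(e, 0) + 1
  let cnt : PySem.Dict (Int × Int) Int :=
    edges.foldl (fun d e => d.insert e (d.getD e 0 + 1)) PySem.Dict.empty
  -- sum(map[a][b] * c for (a, b), c in cnt.items())
  cnt.items.foldl (fun s kv =>
    s + PySem.List.pyGetD (PySem.List.pyGetD map kv.1.1 []) kv.1.2 0 * kv.2) 0

-- ===== PRECONDITION & SPEC =====
-- Pre_ excludes exactly the inputs on which the Python raises IndexError: every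
-- matrix access map[a][b] made along some truck's closed path must be in range
-- (Python's negative-index rule included).
def Pre_r_len (map : List (List Int)) (solution : List (List Int)) : Prop :=
  ∀ route ∈ solution, route ≠ [] →
    ∀ p ∈ List.zip (0 :: (route ++ [0])) (route ++ [0]),
      (-(map.length : Int) ≤ p.1 ∧ p.1 < (map.length : Int)) ∧
      (-(((PySem.List.pyGetD map p.1 []).length : Int)) ≤ p.2 ∧
        p.2 < ((PySem.List.pyGetD map p.1 []).length : Int))
instance (map : List (List Int)) (solution : List (List Int)) : Decidable (Pre_r_len map solution) := by unfold Pre_r_len; infer_instance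

def pvWitness_r_len : List (List Int) × List (List Int) := ([[0, 3], [4, 0]], [[1], []])

def Spec_r_len (map : List (List Int)) (solution : List (List Int)) (out : Int) : Prop := out = r_len_alt map solution
instance (map : List (List Int)) (solution : List (List Int)) (out : Int) : Decidable (Spec_r_len map solution out) := by unfold Spec_r_len; infer_instance

-- ===== CLAIM (what is proved, stated in full; the proofs are below) =====
def Claim_equal_r_len : Prop := ∀ (map : List (List Int)) (solution : List (List Int)), Dom_r_len map solution → Pre_r_len map solution → Spec_r_len map solution (r_len map solution)

-- ===== LEMMAS AND PROOFS =====

-- Weight of one edge.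
def edgeW (map : List (List Int)) (p : Int × Int) : Int :=
  PySem.List.pyGetD (PySem.List.pyGetD map p.1 []) p.2 0

-- Sum of g over the consecutive pairs of a :: l.
def pairSum (g : Int → Int → Int) : Int → List Int → Int
  | _, [] => 0
  | a, b :: l => g a b + pairSum g b l

-- pairSum over l ++ [z] splits off the final edge from the last element of a :: l.
theorem pairSum_append_singleton (g : Int → Int → Int) :
    ∀ (l : List Int) (a z : Int),
      pairSum g a (l ++ [z]) = pairSum g a l + g ((a :: l).getLast (by simp)) z := by
  intro l
  induction l with
  | nil => intro a z; simp [pairSum]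
  | cons b l ih =>
    intro a z
    simp only [List.cons_append, pairSum, ih]
    rw [List.getLast_cons_cons]
    ring

-- A's inner indexed loop from j = k+1 computes init + pairSum from route[k].
theorem innerLoop (g : Int → Int → Int) (route : List Int) :
    ∀ (d k : Nat) (init : Int), route.length - (k + 1) = d →
      (PySem.List.pyRange ((k : Int) + 1) (route.length : Int) 1).foldl
          (fun s j => s + g (PySem.List.pyGetD route (j - 1) 0) (PySem.List.pyGetD route j 0))
          init
        = init + pairSum g (route.getD k 0) (route.drop (k + 1)) := by
  intro d
  induction d with
  | zero =>
    intro k init hd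
    have hlen : route.length ≤ k + 1 := by omega
    have hempty : PySem.List.pyRange ((k : Int) + 1) (route.length : Int) 1 = [] := by
      simp [PySem.List.pyRange]; omega
    have hdrop : route.drop (k + 1) = [] := List.drop_eq_nil_of_le hlen
    simp [hempty, hdrop, pairSum]
  | succ d ih =>
    intro k init hd
    have hk : k + 1 < route.length := by omega
    have hcons : PySem.List.pyRange ((k : Int) + 1) (route.length : Int) 1
        = ((k : Int) + 1) :: PySem.List.pyRange ((k : Int) + 1 + 1) (route.length : Int) 1 := by
      apply PySem.List.pyRange_one_cons
      exact_mod_cast hk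
    have h1 : ((k : Int) + 1 + 1) = ((k + 1 : Nat) : Int) + 1 := by push_cast; ring
    have h2 : ((k : Int) + 1 - 1) = ((k : Nat) : Int) := by ring
    rw [hcons, List.foldl_cons, h1,
      ih (k + 1) _ (by omega)]
    have ha : PySem.List.pyGetD route ((k : Int) + 1 - 1) 0 = route.getD k 0 := by
      rw [h2, PySem.List.pyGetD_natCast]
    have hb : PySem.List.pyGetD route ((k : Int) + 1) 0 = route.getD (k + 1) 0 := by
      have : ((k : Int) + 1) = ((k + 1 : Nat) : Int) := by push_cast; ring
      rw [this, PySem.List.pyGetD_natCast]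
    have hdrop : route.drop (k + 1) = route.getD (k + 1) 0 :: route.drop (k + 1 + 1) := by
      rw [List.getD_eq_getElem route 0 hk]
      exact (List.getElem_cons_drop hk).symm
    rw [ha, hb, hdrop]
    simp [pairSum]
    ring

-- The zip of a route's closed path against its shifted extension.
theorem zip_shift : ∀ (l : List Int) (a z : Int),
    List.zip (a :: l) (l ++ [z]) = List.zip (a :: (l ++ [z])) (l ++ [z]) := by
  intro l
  induction l with
  | nil => intro a z; rfl
  | cons b l ih =>
    intro a z
    simp only [List.cons_append, List.zip_cons_cons]
    rw [ih]

-- The edge-weight sum over zip (a :: l) l is pairSum.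
theorem zip_map_sum (map : List (List Int)) :
    ∀ (l : List Int) (a : Int),
      ((List.zip (a :: l) l).map (edgeW map)).sum
        = pairSum (fun a b => PySem.List.pyGetD (PySem.List.pyGetD map a []) b 0) a l := by
  intro l
  induction l with
  | nil => intro a; simp [pairSum]
  | cons b l ih =>
    intro a
    simp only [List.zip_cons_cons, List.map_cons, List.sum_cons, ih, pairSum, edgeW]

-- A's per-route body equals the weight sum of that route's edge segment.
theorem body_eq (map : List (List Int)) (r0 : Int) (rs : List Int) :
    (PySem.List.pyRange 1 (((r0 :: rs) : List Int).length : Int) 1).foldl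
        (fun length j => length + PySem.List.pyGetD
            (PySem.List.pyGetD map (PySem.List.pyGetD (r0 :: rs) (j - 1) 0) [])
            (PySem.List.pyGetD (r0 :: rs) j 0) 0)
        (PySem.List.pyGetD (PySem.List.pyGetD map 0 []) (PySem.List.pyGetD (r0 :: rs) 0 0) 0)
      + PySem.List.pyGetD (PySem.List.pyGetD map (PySem.List.pyGetD (r0 :: rs) (-1) 0) []) 0 0
    = ((List.zip (0 :: (r0 :: rs)) ((r0 :: rs) ++ [0])).map (edgeW map)).sum := by
  have hloop := innerLoop (fun a b => PySem.List.pyGetD (PySem.List.pyGetD map a []) b 0)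
    (r0 :: rs) rs.length 0
    (PySem.List.pyGetD (PySem.List.pyGetD map 0 []) (PySem.List.pyGetD (r0 :: rs) 0 0) 0)
    (by simp)
  simp only [Nat.cast_zero, zero_add, List.getD_cons_zero, List.drop_succ_cons,
    List.drop_zero] at hloop
  rw [zip_shift, hloop]
  have hz := zip_map_sum map ((r0 :: rs) ++ [0]) 0
  rw [hz,
    show ((r0 :: rs) ++ [0] : List Int) = r0 :: (rs ++ [0]) from rfl,
    show pairSum (fun a b => PySem.List.pyGetD (PySem.List.pyGetD map a []) b 0) 0 (r0 :: (rs ++ [0]))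
      = PySem.List.pyGetD (PySem.List.pyGetD map 0 []) r0 0
        + pairSum (fun a b => PySem.List.pyGetD (PySem.List.pyGetD map a []) b 0) r0 (rs ++ [0]) from rfl,
    pairSum_append_singleton,
    PySem.List.pyGetD_zero_cons]
  simp [PySem.List.pyGetD_neg_one, add_assoc]

-- B's flat edge list.
def segEdges (route : List Int) : List (Int × Int) := List.zip (0 :: route) (route ++ [0])

def allEdges (solution : List (List Int)) : List (Int × Int) :=
  solution.foldl (fun edges route =>
    if route = [] then edges else edges ++ segEdges route) []

-- A computes the plain weight sum of the flat edge list.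
theorem a_fold_eq (map : List (List Int)) :
    ∀ (sol : List (List Int)) (acc : List (Int × Int)) (init : Int),
      init = ((acc.map (edgeW map)).sum) →
      sol.foldl (fun total_len route =>
        if route = [] then total_len
        else
          let length : Int :=
            PySem.List.pyGetD (PySem.List.pyGetD map 0 []) (PySem.List.pyGetD route 0 0) 0
          let length :=
            (PySem.List.pyRange 1 (route.length : Int) 1).foldl
              (fun length j =>
                length + PySem.List.pyGetD
                  (PySem.List.pyGetD map (PySem.List.pyGetD route (j - 1) 0) [])
                  (PySem.List.pyGetD route j 0) 0)
              length
          total_len + (length +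
            PySem.List.pyGetD
              (PySem.List.pyGetD map (PySem.List.pyGetD route (-1) 0) []) 0 0)) init
      = (((sol.foldl (fun edges route =>
            if route = [] then edges else edges ++ segEdges route) acc).map (edgeW map)).sum) := by
  intro sol
  induction sol with
  | nil => intro acc init h; simpa using h
  | cons route sol ih =>
    intro acc init h
    cases route with
    | nil => simp only [List.foldl_cons]; exact ih acc init h
    | cons r0 rs =>
      simp only [List.foldl_cons, if_neg (List.cons_ne_nil r0 rs)]
      apply ih
      rw [List.map_append, List.sum_append, h, segEdges, ← body_eq map r0 rs]

-- foldl-accumulated sum is the mapped sum.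
theorem foldl_add_sum {α : Type} (f : α → Int) :
    ∀ (l : List α) (s : Int), l.foldl (fun s x => s + f x) s = s + (l.map f).sum := by
  intro l
  induction l with
  | nil => intro s; simp
  | cons x l ih => intro s; simp only [List.foldl_cons, List.map_cons, List.sum_cons, ih]; ring

-- Summing if k = a over a nodup list containing a picks out x.
theorem sum_ite_single (x : Int) :
    ∀ (ks : List (Int × Int)) (a : Int × Int), ks.Nodup → a ∈ ks →
      (ks.map (fun k => if k = a then x else 0)).sum = x := by
  intro ks
  induction ks with
  | nil => intro a _ h; cases h
  | cons b ks ih =>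
    intro a hnd hm
    simp only [List.map_cons, List.sum_cons]
    rcases List.mem_cons.mp hm with h | h
    · subst h
      have : ∀ k ∈ ks, (if k = a then x else 0) = 0 := by
        intro k hk
        have : k ≠ a := fun he => (List.nodup_cons.mp hnd).1 (he ▸ hk)
        simp [this]
      rw [if_pos rfl, List.sum_eq_zero]
      · ring
      · intro y hy
        rcases List.mem_map.mp hy with ⟨k, hk, hke⟩
        rw [← hke]; exact this k hk
    · have hba : b ≠ a := fun he => (List.nodup_cons.mp hnd).1 (he ▸ h)
      rw [if_neg hba, ih a (List.nodup_cons.mp hnd).2 h]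
      ring

-- Count-weighted sum over a covering nodup key list equals the plain sum.
theorem count_weighted_sum (f : Int × Int → Int) :
    ∀ (E ks : List (Int × Int)), ks.Nodup → (∀ e ∈ E, e ∈ ks) →
      (ks.map (fun k => f k * (E.count k : Int))).sum = (E.map f).sum := by
  intro E
  induction E with
  | nil => intro ks _ _; simp
  | cons e E ih =>
    intro ks hnd hcov
    have hcov' : ∀ x ∈ E, x ∈ ks := fun x hx => hcov x (List.mem_cons_of_mem e hx)
    have he : e ∈ ks := hcov e (List.mem_cons_self)
    have hsplit : ∀ k : Int × Int,
        f k * (((e :: E).count k : Nat) : Int)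
          = f k * ((E.count k : Nat) : Int) + (if k = e then f e else 0) := by
      intro k
      by_cases h : k = e
      · subst h
        simp
        ring
      · simp [List.count_cons, h]
        exact Or.inl (fun he' => h he'.symm)
    calc (ks.map (fun k => f k * (((e :: E).count k : Nat) : Int))).sum
        = (ks.map (fun k => f k * ((E.count k : Nat) : Int) + (if k = e then f e else 0))).sum := by
          congr 1; exact List.map_congr_left (fun k _ => hsplit k)
      _ = (ks.map (fun k => f k * ((E.count k : Nat) : Int))).sum
            + (ks.map (fun k => if k = e then f e else 0)).sum := by
          rw [← List.sum_map_add]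
      _ = (E.map f).sum + f e := by rw [ih ks hnd hcov', sum_ite_single (f e) ks e hnd he]
      _ = ((e :: E).map f).sum := by simp [List.map_cons]; ring

-- B computes the plain weight sum of the flat edge list.
theorem b_eq_sum (map : List (List Int)) (solution : List (List Int)) :
    r_len_alt map solution = ((allEdges solution).map (edgeW map)).sum := by
  simp only [r_len_alt]
  have hE : (solution.foldl (fun edges route =>
      if route = [] then edges
      else edges ++ List.zip (0 :: route) (route ++ [0])) []) = allEdges solution := rfl
  rw [hE]
  set E := allEdges solution with hEdef
  rw [PySem.Dict.foldl_insert_getD_add_one_eq_counter, PySem.Dict.items_counter]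
  have h1 : List.foldl (fun s kv =>
        s + PySem.List.pyGetD (PySem.List.pyGetD map kv.1.1 []) kv.1.2 0 * kv.2) 0
        ((PySem.Set.ofList E).map (fun k => (k, (E.count k : Int))))
      = 0 + (((PySem.Set.ofList E).map (fun k => (k, (E.count k : Int)))).map
          (fun kv : (Int × Int) × Int =>
            PySem.List.pyGetD (PySem.List.pyGetD map kv.1.1 []) kv.1.2 0 * kv.2)).sum :=
    foldl_add_sum _ _ 0
  rw [h1, zero_add, List.map_map]
  have h2 : ((PySem.Set.ofList E).map
      ((fun kv : (Int × Int) × Int => PySem.List.pyGetD (PySem.List.pyGetD map kv.1.1 []) kv.1.2 0 * kv.2)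
        ∘ (fun k => (k, (E.count k : Int))))).sum
      = ((PySem.Set.ofList E).map (fun k => edgeW map k * (E.count k : Int))).sum := by
    congr 1
  rw [h2]
  exact count_weighted_sum (edgeW map) E (PySem.Set.ofList E)
    (PySem.Set.nodup_ofList E) (fun e he => (PySem.Set.mem_ofList E e).mpr he)

-- ===== VERDICT (by name: the statement is the Claim_ definition above) =====
theorem r_len_spec : Claim_equal_r_len := by
  intro map solution _ _
  unfold Spec_r_len
  rw [b_eq_sum]
  unfold r_len
  exact a_fold_eq map solution [] 0 (by simp)
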